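-- pv_equiv track=rewrite | github.com/bytes-Coding-official/SanarjaBWLAnalyse | Huggingface.py | split_into_passages
-- ===== SOURCE A (Python) =====
-- max_length = 1024
--
-- def split_into_passages(text, max_length=max_length):
--     words = text.split()
--     passages = []
--     current_passage = []
--
--     for word in words:
--         current_passage.append(word)
--         if len(current_passage) >= max_length:
--             passages.append(" ".join(current_passage))
--             current_passage = []
--
--     # Fügen Sie den verbleibenden Teil hinzu, wenn vorhanden
--     if current_passage:
--         passages.append(" ".join(current_passage))
--
--     return passages
-- ===== SOURCE B (Python) =====
-- max_length = 1024
--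
-- def split_into_passages(text, max_length=max_length):
--     # Chunk the word list directly: take `step` words at a time.
--     words = text.split()
--     step = max(max_length, 1)  # a passage holds at least one word
--     passages = []
--     while words:
--         passages.append(" ".join(words[:step]))
--         words = words[step:]
--     return passages
-- ===== Notes on version B (the rewrite author's own statement) =====
-- stated objective: simpler
-- what changed: Replaces the per-word accumulator with its length-threshold flush branch by direct chunking of the word list (take the next step words, join, drop them), with step = max(max_length, 1) capturing the one-word-per-passage behaviour for non-positive max_length.
import Mathlib
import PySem

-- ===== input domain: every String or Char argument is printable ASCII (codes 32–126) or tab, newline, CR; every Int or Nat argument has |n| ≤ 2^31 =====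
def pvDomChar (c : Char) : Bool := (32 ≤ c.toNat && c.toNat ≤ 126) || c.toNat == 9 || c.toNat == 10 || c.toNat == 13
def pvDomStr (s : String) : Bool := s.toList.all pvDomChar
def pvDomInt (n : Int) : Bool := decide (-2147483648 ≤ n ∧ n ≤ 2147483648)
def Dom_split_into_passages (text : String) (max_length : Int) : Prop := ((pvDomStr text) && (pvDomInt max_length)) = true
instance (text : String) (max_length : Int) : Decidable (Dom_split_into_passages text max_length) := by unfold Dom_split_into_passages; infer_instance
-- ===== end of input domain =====

-- B replaces A's per-word accumulator and flush branch by direct chunking of the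
-- word list (take the next `step` words, join, drop them); objective: simpler.


-- ===== PORT A =====
-- A's loop body: append word to current_passage; flush when its length reaches max_length.
def aStep (m : Int) (st : List String × List String) (word : String) : List String × List String :=
  let cur := st.2 ++ [word]
  if m ≤ (cur.length : Int) then (st.1 ++ [PySem.Str.join " " cur], [])
  else (st.1, cur)

-- Literal transliteration of A: fold over the words keeping (passages, current_passage),
-- then a final flush if current_passage is nonempty.
def split_into_passages (text : String) (max_length : Int) : List String :=
  let words := PySem.Str.split₀ text
  let st := words.foldl (aStep max_length) ([], [])
  if st.2 ≠ [] then st.1 ++ [PySem.Str.join " " st.2] else st.1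

-- ===== PORT B =====
-- B's while loop: while words: passages.append(" ".join(words[:step])); words = words[step:].
-- `s` is step - 1 (so the chunk size s + 1 is positive structurally);
-- words[:step] = take (s+1), words[step:] = drop (s+1), exact for step ≥ 1.
def chunkLoop (s : Nat) (ws : List String) : List String :=
  if h : ws = [] then []
  else PySem.Str.join " " (ws.take (s + 1)) :: chunkLoop s (ws.drop (s + 1))
termination_by ws.length
decreasing_by cases ws with
  | nil => exact absurd rfl h
  | cons a t => simp

def split_into_passages_alt (text : String) (max_length : Int) : List String :=
  let words := PySem.Str.split₀ text
  let step := max max_length 1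
  chunkLoop (step.toNat - 1) words

-- ===== PRECONDITION & SPEC =====
def Spec_split_into_passages (text : String) (max_length : Int) (out : List String) : Prop := out = split_into_passages_alt text max_length
instance (text : String) (max_length : Int) (out : List String) : Decidable (Spec_split_into_passages text max_length out) := by unfold Spec_split_into_passages; infer_instance

-- ===== CLAIM (what is proved, stated in full; the proofs are below) =====
def Claim_equal_split_into_passages : Prop := ∀ (text : String) (max_length : Int), Dom_split_into_passages text max_length → Spec_split_into_passages text max_length (split_into_passages text max_length)

-- ===== LEMMAS AND PROOFS =====

-- A's flush condition on a nonempty current passage agrees with the chunk size s + 1.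
theorem cond_iff (m : Int) (s L : Nat) (hs : s = (max m 1).toNat - 1) (hL : 1 ≤ L) :
    (m ≤ (L : Int)) ↔ (s + 1 ≤ L) := by
  by_cases h : m ≤ 1
  · constructor <;> intro _ <;> omega
  · have : (max m 1).toNat = m.toNat := by omega
    constructor <;> intro _ <;> omega

-- Invariant: folding A's loop from (p, c) with c shorter than the chunk size,
-- then flushing, yields p followed by the chunks of c ++ ws.
theorem loop_invariant (m : Int) (s : Nat) (hs : s = (max m 1).toNat - 1)
    (ws : List String) : ∀ (p c : List String), c.length < s + 1 →
    (let st := ws.foldl (aStep m) (p, c)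
     if st.2 ≠ [] then st.1 ++ [PySem.Str.join " " st.2] else st.1) =
    p ++ chunkLoop s (c ++ ws) := by
  induction ws with
  | nil =>
    intro p c hc
    simp only [List.foldl_nil, List.append_nil]
    by_cases h : c = []
    · subst h; simp [chunkLoop]
    · rw [chunkLoop]
      have ht : c.take (s + 1) = c := List.take_of_length_le (by omega)
      have hd : c.drop (s + 1) = [] := List.drop_eq_nil_of_le (by omega)
      simp [h, ht, hd, chunkLoop]
  | cons w rest ih =>
    intro p c hc
    simp only [List.foldl_cons]
    by_cases hflush : m ≤ (((c ++ [w]).length : Nat) : Int)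
    · have hflush' : m ≤ (c.length : Int) + 1 := by simpa using hflush
      have hlen : (c ++ [w]).length = s + 1 := by
        have h1 : 1 ≤ (c ++ [w]).length := by simp
        have := (cond_iff m s (c ++ [w]).length hs h1).mp hflush
        simp only [List.length_append, List.length_cons, List.length_nil] at this ⊢
        omega
      rw [show aStep m (p, c) w = (p ++ [PySem.Str.join " " (c ++ [w])], []) from by
        simp [aStep, hflush']]
      rw [ih (p ++ [PySem.Str.join " " (c ++ [w])]) [] (by simp)]
      have hsplit : c ++ w :: rest = (c ++ [w]) ++ rest := by simp
      have hne : c ++ w :: rest ≠ [] := by simp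
      have ht : (c ++ w :: rest).take (s + 1) = c ++ [w] := by
        rw [hsplit, List.take_append_of_le_length (by omega), List.take_of_length_le (by omega)]
      have hd : (c ++ w :: rest).drop (s + 1) = rest := by
        rw [hsplit, ← hlen, List.drop_left]
      have hrhs : chunkLoop s (c ++ w :: rest)
          = PySem.Str.join " " (c ++ [w]) :: chunkLoop s rest := by
        rw [chunkLoop]; simp [hne, ht, hd]
      rw [hrhs]; simp
    · have hflush' : ¬ m ≤ (c.length : Int) + 1 := by simpa using hflush
      have hlen : (c ++ [w]).length < s + 1 := by
        have h1 : 1 ≤ (c ++ [w]).length := by simp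
        have := (cond_iff m s (c ++ [w]).length hs h1).not.mp hflush
        omega
      rw [show aStep m (p, c) w = (p, c ++ [w]) from by simp [aStep, hflush']]
      rw [ih p (c ++ [w]) hlen]
      simp

-- ===== VERDICT (by name: the statement is the Claim_ definition above) =====
theorem split_into_passages_spec : Claim_equal_split_into_passages := by
  intro text max_length _
  show split_into_passages text max_length = split_into_passages_alt text max_length
  unfold split_into_passages split_into_passages_alt
  have h := loop_invariant max_length ((max max_length 1).toNat - 1) rfl
    (PySem.Str.split₀ text) [] [] (by simp)
  simpa using h
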